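-- pv_equiv track=rewrite | github.com/Jonathana1106/PythonITP | Practicas/Practica 5 Intro.py | taux
-- ===== SOURCE A (Python) =====
-- def taux(matriz, i, j):
--     if i >= len(matriz) :
--         return True
--     elif i == j:
--         if matriz[i][j] == 0:
--             return False
--         else:
--             return taux(matriz, i+1, 0)
--     elif i > j:
--         if matriz[i][j] == 0:
--             return taux(matriz, i, j+1)
--         else:
--             return False
-- ===== SOURCE B (Python) =====
-- def taux(matriz, i, j):
--     n = len(matriz)
--     while i < n:
--         row = matriz[i]
--         if any(row[j:i]) or row[i] == 0:
--             return False
--         i += 1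
--         j = 0
--     return True
-- ===== Notes on version B (the rewrite author's own statement) =====
-- stated objective: simpler
-- what changed: Replaces the cell-by-cell tail recursion with a single iterative row loop that tests the whole below-diagonal part of a row at once with a slice and any(), then the diagonal entry.
-- outside the precondition, e.g. on taux([[1], [2, 6, 2]], -733, 7): A returns None, B raises IndexError; on taux([[5, 1], [3]], 0, 1): A returns None, B returns False; on taux([[0, 0], [1]], 0, 0): A returns False, B returns False
import Mathlib
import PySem

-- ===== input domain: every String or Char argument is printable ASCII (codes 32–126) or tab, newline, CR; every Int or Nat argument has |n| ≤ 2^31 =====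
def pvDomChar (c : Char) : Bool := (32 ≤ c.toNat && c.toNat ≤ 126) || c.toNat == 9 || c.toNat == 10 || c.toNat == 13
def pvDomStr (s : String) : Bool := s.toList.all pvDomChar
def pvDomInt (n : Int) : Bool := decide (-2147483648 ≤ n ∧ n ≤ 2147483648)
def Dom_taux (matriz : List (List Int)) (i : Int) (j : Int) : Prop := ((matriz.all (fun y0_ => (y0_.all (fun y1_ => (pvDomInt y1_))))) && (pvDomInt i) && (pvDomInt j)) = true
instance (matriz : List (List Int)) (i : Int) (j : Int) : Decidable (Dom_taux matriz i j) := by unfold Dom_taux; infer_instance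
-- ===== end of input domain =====

-- B replaces A's cell-by-cell tail recursion by one iterative row loop (slice + any, then the diagonal entry); same value on Pre_.

-- ===== PORT A =====
-- Literal port of the recursion. Python returns None on i < j (with i < len(matriz)) — no Bool value —
-- and raises IndexError when pyGet? is none; both lie outside Pre_taux, where the port's `.getD` defaults are never reached.
def taux (matriz : List (List Int)) (i : Int) (j : Int) : Bool :=
  if (matriz.length : Int) ≤ i then true
  else if i == j then
    if ((PySem.List.pyGet? ((PySem.List.pyGet? matriz i).getD []) j).getD 0) == 0 then false
    else taux matriz (i + 1) 0
  else if j < i then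
    if ((PySem.List.pyGet? ((PySem.List.pyGet? matriz i).getD []) j).getD 0) == 0 then taux matriz i (j + 1)
    else false
  else false  -- Python's fall-through `return None`, outside Pre_taux
termination_by (((matriz.length : Int) - i).toNat, (i - j).toNat)
decreasing_by
  · apply Prod.Lex.left; omega
  · apply Prod.Lex.right; omega

-- ===== PORT B =====
-- The while-loop of Source B; `row[j:i]` is PySem.List.slice, `any` over ints is truthiness (≠ 0).
-- `row[i]` is ported as (pyGet? …).getD 0: its IndexError case lies outside Pre_taux.
def tauxAltLoop (matriz : List (List Int)) (i : Int) (j : Int) : Bool :=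
  if i < (matriz.length : Int) then
    let row := (PySem.List.pyGet? matriz i).getD []
    if (PySem.List.slice row (some j) (some i)).any (fun x => x != 0)
        || ((PySem.List.pyGet? row i).getD 0) == 0 then false
    else tauxAltLoop matriz (i + 1) 0
  else true
termination_by (((matriz.length : Int) - i)).toNat
decreasing_by omega

def taux_alt (matriz : List (List Int)) (i : Int) (j : Int) : Bool :=
  tauxAltLoop matriz i j

-- ===== PRECONDITION & SPEC =====
-- Pre_taux excludes: (a) i < len(matriz) with i < j or j < 0 or i < 0 (Python A returns None — not a Bool — or
-- wraps/raises on negative indices), and (b) scans where a visited row k ∈ [i, len) is not longer than k, where A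
-- can raise IndexError mid-scan.  (b) is slightly narrower than A's raising set: on such matrices whose scan exits
-- early A still returns a Bool (and B agrees there), but characterising the raise-free ones in closed form would
-- re-simulate the scan; see the cite in claim.json.
def Pre_taux (matriz : List (List Int)) (i : Int) (j : Int) : Prop :=
  (matriz.length : Int) ≤ i ∨
  (0 ≤ j ∧ j ≤ i ∧ ∀ k, k < matriz.length → i.toNat ≤ k → k < (matriz.getD k []).length)
instance (matriz : List (List Int)) (i : Int) (j : Int) : Decidable (Pre_taux matriz i j) := by
  unfold Pre_taux; infer_instance

def pvWitness_taux : List (List Int) × Int × Int := ([[1], [0, 2]], 0, 0)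

def Spec_taux (matriz : List (List Int)) (i : Int) (j : Int) (out : Bool) : Prop := out = taux_alt matriz i j
instance (matriz : List (List Int)) (i : Int) (j : Int) (out : Bool) : Decidable (Spec_taux matriz i j out) := by
  unfold Spec_taux; infer_instance

-- ===== CLAIM (what is proved, stated in full; the proofs are below) =====
def Claim_equal_taux : Prop := ∀ (matriz : List (List Int)) (i : Int) (j : Int), Dom_taux matriz i j → Pre_taux matriz i j → Spec_taux matriz i j (taux matriz i j)

-- ===== LEMMAS AND PROOFS =====

theorem taux_eq_loop (matriz : List (List Int)) (i j : Int)
    (hj : 0 ≤ j) (hji : j ≤ i)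
    (hrows : ∀ k, k < matriz.length → i.toNat ≤ k → k < (matriz.getD k []).length) :
    taux matriz i j = tauxAltLoop matriz i j := by
  by_cases hlen : (matriz.length : Int) ≤ i
  · rw [taux, tauxAltLoop]
    simp [hlen, not_lt.mpr hlen]
  · rw [not_le] at hlen
    have hi0 : 0 ≤ i := le_trans hj hji
    have hiN : i.toNat < matriz.length := by omega
    have hrow : PySem.List.pyGet? matriz i = some (matriz.getD i.toNat []) := by
      rw [PySem.List.pyGet?_of_nonneg matriz hi0, List.getElem?_eq_getElem hiN]
      simp [List.getD, List.getElem?_eq_getElem hiN]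
    have hrlen : i.toNat < (matriz.getD i.toNat []).length := hrows i.toNat hiN (le_refl _)
    set row := matriz.getD i.toNat [] with hrowdef
    have hdiag : PySem.List.pyGet? row i = some row[i.toNat] := by
      rw [PySem.List.pyGet?_of_nonneg row hi0, List.getElem?_eq_getElem hrlen]
    rcases eq_or_lt_of_le hji with hji' | hji'
    · -- j = i : empty slice, compare diagonal entries
      subst hji'
      have hslice : PySem.List.slice row (some j) (some j) = [] := by
        rw [PySem.List.slice_toNat row hj hj]
        simp
      rw [taux, tauxAltLoop]
      simp only [not_le.mpr hlen, if_pos hlen, beq_self_eq_true,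
        if_true, hrow, Option.getD_some, hdiag, hslice, List.any_nil, Bool.false_or]
      by_cases hz : row[j.toNat] = 0
      · simp [hz]
      · simp only [hz, beq_iff_eq, if_neg not_false]
        exact taux_eq_loop matriz (j + 1) 0 (le_refl 0) (by omega)
          (fun k hk hk' => hrows k hk (by omega))
    · -- j < i : the slice starts with row[j]
      have hjN : j.toNat < i.toNat := by omega
      have hjr : j.toNat < row.length := by omega
      have hcell : PySem.List.pyGet? row j = some row[j.toNat] := by
        rw [PySem.List.pyGet?_of_nonneg row hj, List.getElem?_eq_getElem hjr]
      have hslice : PySem.List.slice row (some j) (some i)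
          = row[j.toNat] :: PySem.List.slice row (some (j + 1)) (some i) := by
        rw [PySem.List.slice_toNat row hj hi0, PySem.List.slice_toNat row (by omega : (0:Int) ≤ j + 1) hi0]
        rw [List.drop_eq_getElem_cons hjr]
        have h1 : (j + 1).toNat = j.toNat + 1 := by omega
        have h2 : i.toNat - j.toNat = (i.toNat - (j.toNat + 1)) + 1 := by omega
        rw [h1, h2, List.take_succ_cons]
      by_cases hz : row[j.toNat] = 0
      · -- both skip the zero cell
        have hstep : tauxAltLoop matriz i j = tauxAltLoop matriz i (j + 1) := by
          conv_lhs => rw [tauxAltLoop]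
          conv_rhs => rw [tauxAltLoop]
          simp only [if_pos hlen, hrow, Option.getD_some, hslice, List.any_cons, hz,
            bne_self_eq_false, Bool.false_or]
        rw [hstep, taux]
        have hne : ¬ (i == j) = true := by simp; omega
        simp only [not_le.mpr hlen, hne, Bool.false_eq_true, if_false,
          if_pos hji', hrow, Option.getD_some, hcell, hz]
        simp only [beq_self_eq_true, if_true]
        exact taux_eq_loop matriz i (j + 1) (by omega) (by omega) hrows
      · -- nonzero below-diagonal cell: both return false
        rw [taux, tauxAltLoop]
        have hne : ¬ (i == j) = true := by simp; omega
        simp only [not_le.mpr hlen, hne, Bool.false_eq_true, if_false,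
          if_pos hji', if_pos hlen, hrow, Option.getD_some, hcell, hslice, List.any_cons]
        have hneq : (row[j.toNat] != 0) = true := by simp [hz]
        simp only [hz, beq_iff_eq, if_neg not_false, hneq, Bool.true_or, if_pos trivial]
termination_by (((matriz.length : Int) - i).toNat, (i - j).toNat)
decreasing_by
  all_goals first
  | (apply Prod.Lex.right; omega)
  | (apply Prod.Lex.left; omega)

-- ===== VERDICT (by name: the statement is the Claim_ definition above) =====
theorem taux_spec : Claim_equal_taux := by
  intro matriz i j _ hpre
  unfold Spec_taux taux_alt
  rcases hpre with hlen | ⟨hj, hji, hrows⟩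
  · rw [taux, tauxAltLoop]
    simp [hlen, not_lt.mpr hlen]
  · exact taux_eq_loop matriz i j hj hji hrows
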